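-- pv_equiv track=rewrite | github.com/Mukshit2/cp1404_pracs | prac5/wimbledon.py | get_countries
-- ===== SOURCE A (Python) =====
-- def get_countries(champions):
--     countries = set()
--     for champ in champions:
--         country = champ[2]
--         countries.add(country)
--     countries_list = sorted(list(countries))
--     countries_string = ', '.join(countries_list)
--     return countries_string
-- ===== SOURCE B (Python) =====
-- def get_countries(champions):
--     all_countries = sorted(champ[2] for champ in champions)
--     result = []
--     for country in all_countries:
--         if not result or result[-1] != country:
--             result.append(country)
--     return ', '.join(result)
-- ===== Notes on version B (the rewrite author's own statement) =====
-- stated objective: alternative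
-- what changed: Replaces the hash-set deduplication followed by sorting of the distinct values with sorting the full country list (duplicates included) and a single pass that drops adjacent duplicates by comparing with the last kept element.
import Mathlib
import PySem

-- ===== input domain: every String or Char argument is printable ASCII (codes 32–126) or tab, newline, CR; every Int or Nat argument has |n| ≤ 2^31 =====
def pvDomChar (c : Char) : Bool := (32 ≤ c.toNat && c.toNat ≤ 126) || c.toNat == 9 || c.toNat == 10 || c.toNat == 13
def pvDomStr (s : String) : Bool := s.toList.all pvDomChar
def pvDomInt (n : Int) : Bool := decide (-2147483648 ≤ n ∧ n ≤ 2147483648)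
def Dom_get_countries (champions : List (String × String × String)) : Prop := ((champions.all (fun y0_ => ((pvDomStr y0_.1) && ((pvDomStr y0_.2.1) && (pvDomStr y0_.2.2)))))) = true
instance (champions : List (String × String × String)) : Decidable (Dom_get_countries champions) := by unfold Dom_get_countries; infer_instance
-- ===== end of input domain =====

-- B replaces A's hash-set dedup + sort-of-distinct by sorting the full country list and
-- collapsing adjacent duplicates in one pass (objective: alternative decomposition).


-- ===== PORT A =====
def get_countries (champions : List (String × String × String)) : String :=
  -- countries = set(); for champ in champions: countries.add(champ[2])
  let countries : PySem.Set String :=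
    champions.foldl (fun s champ => PySem.Set.add s champ.2.2) PySem.Set.empty
  -- countries_list = sorted(list(countries))
  let countries_list := PySem.List.sorted countries (fun x => x) false
  -- ', '.join(countries_list)
  PySem.Str.join ", " countries_list

-- ===== PORT B =====
-- one loop step of B: append c unless it equals the last kept element
-- (result[-1] is only read when result is nonempty, where it equals getLast?)
def pvKeepStep (acc : List String) (c : String) : List String :=
  if acc = [] ∨ acc.getLast? ≠ some c then acc ++ [c] else acc

def get_countries_alt (champions : List (String × String × String)) : String :=
  let all_countries := PySem.List.sorted (champions.map (fun champ => champ.2.2)) (fun x => x) false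
  let result := all_countries.foldl pvKeepStep []
  PySem.Str.join ", " result

-- ===== PRECONDITION & SPEC =====
def Spec_get_countries (champions : List (String × String × String)) (out : String) : Prop := out = get_countries_alt champions
instance (champions : List (String × String × String)) (out : String) : Decidable (Spec_get_countries champions out) := by unfold Spec_get_countries; infer_instance

-- ===== CLAIM (what is proved, stated in full; the proofs are below) =====
def Claim_equal_get_countries : Prop := ∀ (champions : List (String × String × String)), Dom_get_countries champions → Spec_get_countries champions (get_countries champions)

-- ===== LEMMAS AND PROOFS =====

-- the collapse-adjacent fold on a ≤-sorted list yields a <-sorted list with the same members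
theorem pvFold_props (l acc : List String)
    (hl : l.Pairwise (· ≤ ·)) (hacc : acc.Pairwise (· < ·))
    (hle : ∀ a, acc.getLast? = some a → ∀ c ∈ l, a ≤ c) :
    (l.foldl pvKeepStep acc).Pairwise (· < ·) ∧
      (∀ x, x ∈ l.foldl pvKeepStep acc ↔ x ∈ acc ∨ x ∈ l) := by
  induction l generalizing acc with
  | nil => simpa using hacc
  | cons c t ih =>
    rcases List.pairwise_cons.mp hl with ⟨hct, ht⟩
    simp only [List.foldl_cons]
    by_cases hcond : acc = [] ∨ acc.getLast? ≠ some c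
    · have hstep : pvKeepStep acc c = acc ++ [c] := by simp [pvKeepStep, hcond]
      rw [hstep]
      have hlt : ∀ x ∈ acc, x < c := by
        intro x hx
        obtain ⟨a, ha⟩ := Option.isSome_iff_exists.mp (List.getLast?_isSome.mpr (List.ne_nil_of_mem hx))
        have hac : a ≤ c := hle a ha c (List.mem_cons_self ..)
        have hanec : a ≠ c := by
          rcases hcond with h | h
          · exact absurd (h ▸ hx) (List.not_mem_nil)
          · intro he; exact h (he ▸ ha)
        have hsplit : acc.dropLast ++ [a] = acc := List.dropLast_append_getLast? a ha
        rw [← hsplit] at hx hacc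
        rcases List.mem_append.mp hx with hx' | hx'
        · exact lt_of_lt_of_le (List.pairwise_append.mp hacc |>.2.2 x hx' a (by simp)) hac
        · have : x = a := by simpa using hx'
          exact this ▸ lt_of_le_of_ne hac hanec
      have hacc' : (acc ++ [c]).Pairwise (· < ·) := by
        rw [List.pairwise_append]
        exact ⟨hacc, List.pairwise_singleton _ _, by intro x hx y hy; simp at hy; exact hy ▸ hlt x hx⟩
      have hle' : ∀ a, (acc ++ [c]).getLast? = some a → ∀ d ∈ t, a ≤ d := by
        intro a ha d hd
        simp at ha
        exact ha ▸ hct d hd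
      obtain ⟨h1, h2⟩ := ih (acc ++ [c]) ht hacc' hle'
      refine ⟨h1, fun x => ?_⟩
      rw [h2 x]
      simp [or_assoc, List.mem_append]
    · push Not at hcond
      obtain ⟨hne, hlast⟩ := hcond
      have hstep : pvKeepStep acc c = acc := by simp [pvKeepStep, hne, hlast]
      rw [hstep]
      have hcmem : c ∈ acc := List.mem_of_getLast? hlast
      have hle' : ∀ a, acc.getLast? = some a → ∀ d ∈ t, a ≤ d := by
        intro a ha d hd
        have hac : a = c := Option.some_inj.mp (ha.symm.trans hlast)
        exact hac ▸ hct d hd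
      obtain ⟨h1, h2⟩ := ih acc ht hacc hle'
      refine ⟨h1, fun x => ?_⟩
      rw [h2 x]
      constructor
      · rintro (h | h)
        · exact Or.inl h
        · exact Or.inr (List.mem_cons_of_mem _ h)
      · rintro (h | h); · exact Or.inl h
        rcases List.mem_cons.mp h with rfl | h'
        · exact Or.inl hcmem
        · exact Or.inr h'

theorem get_countries_spec : Claim_equal_get_countries := by
  intro champions _
  unfold Spec_get_countries get_countries get_countries_alt
  have hset : champions.foldl (fun s champ => PySem.Set.add s champ.2.2) PySem.Set.empty
      = PySem.Set.ofList (champions.map (fun champ => champ.2.2)) := by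
    rw [PySem.Set.ofList_eq_foldl, List.foldl_map]
    rfl
  set cs := champions.map (fun champ => champ.2.2) with hcs
  set s := PySem.List.sorted cs (fun x => x) false with hsdef
  have hs : s.Pairwise (· ≤ ·) := PySem.List.sorted_pairwise cs (fun x => x)
  obtain ⟨hlt, hmem⟩ := pvFold_props s [] hs (by simp) (by simp)
  set r := s.foldl pvKeepStep [] with hrdef
  have hnodup : r.Nodup := hlt.imp (fun h => ne_of_lt h)
  have hperm : r.Perm (PySem.Set.ofList cs) := by
    rw [List.perm_ext_iff_of_nodup hnodup (PySem.Set.nodup_ofList cs)]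
    intro x
    rw [hmem x]
    simp [PySem.Set.mem_ofList, hsdef, PySem.List.mem_sorted]
  have hsorted : PySem.List.sorted (PySem.Set.ofList cs) (fun x => x) false = r :=
    PySem.List.sorted_eq_of_perm_of_pairwise_lt (PySem.Set.ofList cs) r (fun x => x) hperm hlt
  simp only []
  rw [hset, hsorted]
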